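-- pv_equiv track=rewrite | github.com/strangerxxxx/kyopro | python/木/オイラーツアー.py | EulerTour2
-- ===== SOURCE A (Python) =====
-- def EulerTour2(n, edges, start=0):
--     reached = [False] * n
--     queue = [~start, start]
--     res = []
--     left = [None] * n
--     right = [None] * n
--     depth = [None] * n
--     childs = [[] for _ in range(n)]
--     index = -1
--     dep = -1
--     while queue:
--         i = queue.pop()
--         index += 1
--         if i >= 0:
--             dep += 1
--             reached[i] = True
--             left[i] = index
--             right[i] = index
--             depth[i] = dep
--             res.append(i)
--             for a in reversed(edges[i]):
--                 if reached[a]: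
--                     continue
--                 queue.append(~a)
--                 queue.append(a)
--                 childs[i].append(a)
--         else:
--             dep -= 1
--             if ~i == res[-1]:
--                 index -= 1
--             else:
--                 res.append(~i)
--                 right[~i] = index
--     return res, left, right, depth, childs
-- ===== SOURCE B (Python) =====
-- def EulerTour2(n, edges, start=0):
--     # Same tour computed by a recursive DFS instead of A's explicit ~i-marker stack.
--     reached = [False] * n
--     res = []
--     left = [None] * n
--     right = [None] * n
--     depth = [None] * n
--     childs = [[] for _ in range(n)]
--
--     def dfs(i, dep):
--         reached[i] = True
--         left[i] = right[i] = len(res)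
--         depth[i] = dep
--         res.append(i)
--         cs = [a for a in reversed(edges[i]) if not reached[a]]
--         childs[i] += cs
--         for a in reversed(cs):
--             dfs(a, dep + 1)
--         if res[-1] != i:
--             res.append(i)
--             right[i] = len(res) - 1
--
--     dfs(start, 0)
--     return res, left, right, depth, childs
-- ===== Notes on version B (the rewrite author's own statement) =====
-- stated objective: alternative
-- what changed: A's single while-loop over an explicit stack that interleaves node entries with ~i close-markers and maintains index/dep counters is replaced by a recursive DFS dfs(i, dep) that uses len(res) in place of the index counter and the call structure in place of the markers.
import Mathlib
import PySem

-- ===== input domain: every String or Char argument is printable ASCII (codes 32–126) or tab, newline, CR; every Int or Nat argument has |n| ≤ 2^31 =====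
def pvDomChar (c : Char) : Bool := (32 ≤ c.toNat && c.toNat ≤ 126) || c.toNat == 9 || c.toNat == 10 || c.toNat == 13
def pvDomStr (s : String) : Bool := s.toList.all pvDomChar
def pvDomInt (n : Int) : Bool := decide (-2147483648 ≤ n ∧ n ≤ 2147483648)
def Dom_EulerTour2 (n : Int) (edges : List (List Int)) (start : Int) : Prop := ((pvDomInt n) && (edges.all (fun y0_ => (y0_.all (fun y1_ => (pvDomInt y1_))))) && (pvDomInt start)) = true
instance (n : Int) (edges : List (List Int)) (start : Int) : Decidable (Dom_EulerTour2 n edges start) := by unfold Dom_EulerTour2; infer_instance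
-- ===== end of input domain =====

-- B computes the same Euler tour by a recursive DFS instead of A's explicit stack with ~i
-- close-markers (objective: alternative decomposition, same cost).  Python A/B mutate only
-- local state, so return values are the whole story.

-- ===== PORT A =====
-- shared array helpers: Pre_ keeps every index i with 0 ≤ i, so plain Nat indexing via
-- .toNat is exact there (Python's negative-index wraparound lies outside Pre_).
def pvNget (r : List Bool) (e : Int) : Bool := r.getD e.toNat false
def pvSetB (r : List Bool) (e : Int) (v : Bool) : List Bool := r.set e.toNat v
def pvSetO (l : List (Option Int)) (e : Int) (v : Int) : List (Option Int) := l.set e.toNat (some v)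
def pvAppC (l : List (List Int)) (e : Int) (cs : List Int) : List (List Int) := l.modify e.toNat (· ++ cs)
-- edges[i]; within Pre_ the index is always in range (out of range would raise in Python)
def pvGetE (edges : List (List Int)) (e : Int) : List Int := (PySem.List.pyGet? edges e).getD []

structure PvStA where
  reached : List Bool
  res : List Int
  left : List (Option Int)
  right : List (Option Int)
  depth : List (Option Int)
  childs : List (List Int)
  index : Int
  dep : Int

-- `for a in reversed(edges[i]): if reached[a]: continue; queue.append(~a); queue.append(a); childs[i].append(a)`
-- the Lean queue keeps Python's TOP (list end) at its head, so a push is a double cons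
def pvPush (reached : List Bool) (l : List Int) (q : List Int) : List Int × List Int :=
  l.foldl (fun acc a => if pvNget reached a then acc else (a :: (-a - 1) :: acc.1, acc.2 ++ [a])) (q, [])

-- A's while-loop; the Nat argument is plain fuel, a totality guard only (on inputs outside
-- Pre_ with negative node ids Python A can loop forever); the final theorem shows the fuel
-- chosen in EulerTour2 is never exhausted inside Pre_.
def pvLoopA (edges : List (List Int)) : Nat → List Int → PvStA → Option PvStA
  | 0, _, _ => none
  | _ + 1, [], s => some s
  | f + 1, i :: rest, s =>
    let index' := s.index + 1
    if 0 ≤ i then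
      let dep' := s.dep + 1
      let reached' := pvSetB s.reached i true
      let qc := pvPush reached' ((pvGetE edges i).reverse) rest
      pvLoopA edges f qc.1
        { reached := reached', res := s.res ++ [i],
          left := pvSetO s.left i index', right := pvSetO s.right i index',
          depth := pvSetO s.depth i dep', childs := pvAppC s.childs i qc.2,
          index := index', dep := dep' }
    else
      let j := -i - 1            -- ~i
      let dep' := s.dep - 1
      if PySem.List.pyGet? s.res (-1) = some j then   -- res[-1] (Python raises on empty res; unreachable inside Pre_)
        pvLoopA edges f rest { s with index := index' - 1, dep := dep' }
      else
        pvLoopA edges f rest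
          { s with res := s.res ++ [j], right := pvSetO s.right j index',
                   index := index', dep := dep' }

def pvFuelA (n : Int) (edges : List (List Int)) : Nat :=
  2 * n.toNat * ((edges.map List.length).sum + 1) + 3

def pvInitA (n : Int) : PvStA :=
  { reached := List.replicate n.toNat false, res := [],
    left := List.replicate n.toNat none, right := List.replicate n.toNat none,
    depth := List.replicate n.toNat none, childs := List.replicate n.toNat [],
    index := -1, dep := -1 }

def EulerTour2 (n : Int) (edges : List (List Int)) (start : Int) :
    List Int × List (Option Int) × List (Option Int) × List (Option Int) × List (List Int) :=
  match pvLoopA edges (pvFuelA n edges) [start, -start - 1] (pvInitA n) with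
  | some t => (t.res, t.left, t.right, t.depth, t.childs)
  | none => ((pvInitA n).res, (pvInitA n).left, (pvInitA n).right, (pvInitA n).depth, (pvInitA n).childs)

-- ===== PORT B =====
structure PvStB where
  reached : List Bool
  res : List Int
  left : List (Option Int)
  right : List (Option Int)
  depth : List (Option Int)
  childs : List (List Int)

-- Source B's dfs(i, dep); the Nat is fuel (totality guard only, cf. pvLoopA)
def pvVisitB (edges : List (List Int)) : Nat → Int → Int → PvStB → Option PvStB
  | 0, _, _, _ => none
  | f + 1, i, dep, s =>
    let len0 : Int := s.res.length
    let s1 : PvStB :=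
      { reached := pvSetB s.reached i true, res := s.res ++ [i],
        left := pvSetO s.left i len0, right := pvSetO s.right i len0,
        depth := pvSetO s.depth i dep, childs := s.childs }
    let cs := (pvGetE edges i).reverse.filter (fun a => !pvNget s1.reached a)
    let s2 := { s1 with childs := pvAppC s1.childs i cs }
    match cs.reverse.foldlM (fun acc a => pvVisitB edges f a (dep + 1) acc) s2 with
    | none => none
    | some s3 =>
      if PySem.List.pyGet? s3.res (-1) = some i then some s3
      else some { s3 with res := s3.res ++ [i], right := pvSetO s3.right i (s3.res.length : Int) }

def pvInitB (n : Int) : PvStB :=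
  { reached := List.replicate n.toNat false, res := [],
    left := List.replicate n.toNat none, right := List.replicate n.toNat none,
    depth := List.replicate n.toNat none, childs := List.replicate n.toNat [] }

def EulerTour2_alt (n : Int) (edges : List (List Int)) (start : Int) :
    List Int × List (Option Int) × List (Option Int) × List (Option Int) × List (List Int) :=
  match pvVisitB edges (pvFuelA n edges) start 0 (pvInitB n) with
  | some r => (r.res, r.left, r.right, r.depth, r.childs)
  | none => ((pvInitB n).res, (pvInitB n).left, (pvInitB n).right, (pvInitB n).depth, (pvInitB n).childs)

-- ===== PRECONDITION & SPEC =====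
-- the nodes the traversal can touch: the reachable set of start, as a computed closure
-- (edges.length + 1 rounds of adding all neighbours always reach the fixpoint)
def pvReach (edges : List (List Int)) (start : Int) : List Int :=
  (fun S => (S ++ S.flatMap (fun i => pvGetE edges i)).dedup)^[edges.length + 1] [start]

-- Pre_ is the natural domain of an adjacency-list traversal: a valid start node, and every
-- node id reachable from start lies in [0, n) and has its adjacency row inside edges.
-- Ids the traversal never reaches are unconstrained (A never looks at them).  Excluded are
-- inputs where a reachable id is ≥ n or ≥ len(edges) (Python A raises IndexError on
-- visiting it) or negative, where Python's negative-index wraparound makes A return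
-- accidental values (or even loop forever) — see the cites in the claim.
def Pre_EulerTour2 (n : Int) (edges : List (List Int)) (start : Int) : Prop :=
  0 ≤ start ∧ start < n ∧ start ∈ pvReach edges start ∧
    ∀ i ∈ pvReach edges start,
      (0 ≤ i ∧ i < n ∧ i < (edges.length : Int)) ∧
      ∀ a ∈ pvGetE edges i, a ∈ pvReach edges start
instance (n : Int) (edges : List (List Int)) (start : Int) : Decidable (Pre_EulerTour2 n edges start) := by
  unfold Pre_EulerTour2; infer_instance

def pvWitness_EulerTour2 : Int × List (List Int) × Int := (3, [[1, 2], [0], [0]], 0)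

def Spec_EulerTour2 (n : Int) (edges : List (List Int)) (start : Int) (out : List Int × List (Option Int) × List (Option Int) × List (Option Int) × List (List Int)) : Prop := out = EulerTour2_alt n edges start
instance (n : Int) (edges : List (List Int)) (start : Int) (out : List Int × List (Option Int) × List (Option Int) × List (Option Int) × List (List Int)) : Decidable (Spec_EulerTour2 n edges start out) := by unfold Spec_EulerTour2; infer_instance

-- ===== CLAIM (what is proved, stated in full; the proofs are below) =====
def Claim_equal_EulerTour2 : Prop := ∀ (n : Int) (edges : List (List Int)) (start : Int), Dom_EulerTour2 n edges start → Pre_EulerTour2 n edges start → Spec_EulerTour2 n edges start (EulerTour2 n edges start)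

-- ===== LEMMAS AND PROOFS =====


-- ---- state conversions and small helper lemmas ----
def pvToB (s : PvStA) : PvStB := ⟨s.reached, s.res, s.left, s.right, s.depth, s.childs⟩
def pvFromB (r : PvStB) (idx dep : Int) : PvStA :=
  ⟨r.reached, r.res, r.left, r.right, r.depth, r.childs, idx, dep⟩
def pvPairs (cs : List Int) : List Int := cs.flatMap (fun a => [a, -a - 1])
-- the closure facts the proofs thread around: members of S are valid node ids and their
-- rows stay inside S
def pvSCw (edges : List (List Int)) (S : List Int) : Prop :=
  ∀ i ∈ S, 0 ≤ i ∧ ∀ a ∈ pvGetE edges i, a ∈ S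
def pvSC (edges : List (List Int)) (n : Nat) (S : List Int) : Prop :=
  ∀ i ∈ S, (0 ≤ i ∧ i < (n : Int)) ∧ ∀ a ∈ pvGetE edges i, a ∈ S

theorem pvToB_fromB (r : PvStB) (idx dep : Int) : pvToB (pvFromB r idx dep) = r := rfl

theorem pvFromB_toB (s : PvStA) : pvFromB (pvToB s) s.index s.dep = s := rfl

theorem pvMem_pairs {x : Int} {cs : List Int} :
    x ∈ pvPairs cs ↔ ∃ a ∈ cs, x = a ∨ x = -a - 1 := by
  simp only [pvPairs, List.mem_flatMap, List.mem_cons,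
    List.not_mem_nil, or_false]

theorem pvLength_pairs (cs : List Int) : (pvPairs cs).length = 2 * cs.length := by
  induction cs with
  | nil => simp [pvPairs]
  | cons a l ih => simp [pvPairs] at ih ⊢; omega

theorem pvPush_eq (r : List Bool) (l : List Int) (q : List Int) :
    pvPush r l q = (pvPairs (l.filter (fun a => !pvNget r a)).reverse ++ q,
      l.filter (fun a => !pvNget r a)) := by
  suffices h : ∀ (l : List Int) (q : List Int) (c : List Int),
      l.foldl (fun acc a => if pvNget r a then acc else (a :: (-a - 1) :: acc.1, acc.2 ++ [a])) (q, c)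
        = (pvPairs (l.filter (fun a => !pvNget r a)).reverse ++ q,
           c ++ l.filter (fun a => !pvNget r a)) by
    simpa using h l q []
  intro l
  induction l with
  | nil => intro q c; simp [pvPairs]
  | cons a l ih =>
    intro q c
    by_cases ha : pvNget r a
    · simp [ha, ih]
    · simp only [List.foldl_cons, ha, if_neg, Bool.not_eq_true, List.filter_cons,
        Bool.not_eq_eq_eq_not, Bool.not_true]
      simp [ih, pvPairs]


-- ---- fuel monotonicity for B ----
theorem pvVisitB_mono (edges : List (List Int)) :
    ∀ f g : Nat, f ≤ g → ∀ (i dep : Int) (s r : PvStB),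
      pvVisitB edges f i dep s = some r → pvVisitB edges g i dep s = some r := by
  intro f
  induction f with
  | zero => intro g _ i dep s r h; simp [pvVisitB] at h
  | succ f ih =>
    intro g hfg i dep s r h
    obtain ⟨g, rfl⟩ : ∃ g', g = g' + 1 := ⟨g - 1, by omega⟩
    rw [pvVisitB] at h ⊢
    have hfold : ∀ (d : List Int) (x y : PvStB),
        d.foldlM (fun acc a => pvVisitB edges f a (dep + 1) acc) x = some y →
        d.foldlM (fun acc a => pvVisitB edges g a (dep + 1) acc) x = some y := by
      intro d
      induction d with
      | nil => intro x y hx; simpa using hx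
      | cons a d ihd =>
        intro x y hx
        rw [List.foldlM_cons] at hx ⊢
        cases hv : pvVisitB edges f a (dep + 1) x with
        | none => rw [hv] at hx; simp at hx
        | some z =>
          rw [hv] at hx
          rw [ih g (by omega) _ _ _ _ hv]
          simp only [Option.bind_eq_bind, Option.bind_some] at hx ⊢
          exact ihd z y hx
    cases hm : (((pvGetE edges i).reverse.filter
        (fun a => !pvNget (pvSetB s.reached i true) a)).reverse).foldlM
        (fun acc a => pvVisitB edges f a (dep + 1) acc) _ with
    | none => rw [hm] at h; simp at h
    | some s3 =>
      rw [hm] at h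
      rw [hfold _ _ _ hm]
      exact h



-- ---- the simulation: A's marker-stack loop computes B's recursive DFS ----
def pvClose (i : Int) (s3 : PvStB) : PvStB :=
  if PySem.List.pyGet? s3.res (-1) = some i then s3
  else { s3 with res := s3.res ++ [i], right := pvSetO s3.right i (s3.res.length : Int) }

theorem pvVisitB_succ (edges : List (List Int)) (f : Nat) (i dep : Int) (s : PvStB) :
    pvVisitB edges (f + 1) i dep s =
      match ((pvGetE edges i).reverse.filter
          (fun a => !pvNget (pvSetB s.reached i true) a)).reverse.foldlM
          (fun acc a => pvVisitB edges f a (dep + 1) acc)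
          ({ reached := pvSetB s.reached i true, res := s.res ++ [i],
             left := pvSetO s.left i (s.res.length : Int),
             right := pvSetO s.right i (s.res.length : Int),
             depth := pvSetO s.depth i dep,
             childs := pvAppC s.childs i ((pvGetE edges i).reverse.filter
               (fun a => !pvNget (pvSetB s.reached i true) a)) } : PvStB) with
      | none => none
      | some s3 => some (pvClose i s3) := by
  rw [pvVisitB]
  cases hm : ((pvGetE edges i).reverse.filter
      (fun a => !pvNget (pvSetB s.reached i true) a)).reverse.foldlM
      (fun acc a => pvVisitB edges f a (dep + 1) acc)
      ({ reached := pvSetB s.reached i true, res := s.res ++ [i],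
         left := pvSetO s.left i (s.res.length : Int),
         right := pvSetO s.right i (s.res.length : Int),
         depth := pvSetO s.depth i dep,
         childs := pvAppC s.childs i ((pvGetE edges i).reverse.filter
           (fun a => !pvNget (pvSetB s.reached i true) a)) } : PvStB) with
  | none => rfl
  | some s3 => simp only [pvClose]; rw [apply_ite some]

theorem pvSim (edges : List (List Int)) (S : List Int) (hS : pvSCw edges S) :
    ∀ fA : Nat, ∀ (i dep : Int) (q : List Int) (s t : PvStA),
      i ∈ S → s.index = (s.res.length : Int) - 1 → s.dep = dep - 1 →
      pvLoopA edges fA (i :: (-i - 1) :: q) s = some t →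
      ∃ fA' r, fA' < fA ∧ pvVisitB edges fA i dep (pvToB s) = some r ∧
        pvLoopA edges fA' q (pvFromB r ((r.res.length : Int) - 1) (dep - 1)) = some t := by
  intro fA
  induction fA using Nat.strong_induction_on with
  | _ fA ih =>
  intro i dep q s t hiS hidx hdep hrun
  have hi : 0 ≤ i := (hS i hiS).1
  match fA, ih, hrun with
  | 0, ih, hrun => simp [pvLoopA] at hrun
  | f + 1, ih, hrun =>
  have hfold : ∀ (d' : List Int), (∀ a ∈ d', a ∈ S) → ∀ (fB : Nat) (q' : List Int) (sB : PvStA),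
      fB ≤ f → sB.index = (sB.res.length : Int) - 1 → sB.dep = dep →
      pvLoopA edges fB (pvPairs d' ++ q') sB = some t →
      ∃ fB' rB, fB' ≤ fB ∧
        d'.foldlM (fun acc a => pvVisitB edges f a (dep + 1) acc) (pvToB sB) = some rB ∧
        pvLoopA edges fB' q' (pvFromB rB ((rB.res.length : Int) - 1) dep) = some t := by
    intro d'
    induction d' with
    | nil =>
      intro _ fB q' sB hfB hidxB hdepB hrunB
      refine ⟨fB, pvToB sB, le_refl _, by simp, ?_⟩
      have hs : pvFromB (pvToB sB) ((sB.res.length : Int) - 1) dep = sB := by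
        rw [← hidxB, ← hdepB]; exact pvFromB_toB sB
      simp only [pvToB] at hs ⊢
      rw [hs]
      simpa [pvPairs] using hrunB
    | cons a d' ihd =>
      intro hpos fB q' sB hfB hidxB hdepB hrunB
      have hq : pvPairs (a :: d') ++ q' = a :: (-a - 1) :: (pvPairs d' ++ q') := by
        simp [pvPairs]
      rw [hq] at hrunB
      obtain ⟨fB1, r1, hlt1, hv1, hrun1⟩ :=
        ih fB (by omega) a (dep + 1) (pvPairs d' ++ q') sB t (hpos a (by simp)) hidxB
          (by omega) hrunB
      rw [show dep + 1 - 1 = dep from by ring] at hrun1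
      obtain ⟨fB', rB, hle', hfold', hrun'⟩ :=
        ihd (fun x hx => hpos x (by simp [hx])) fB1 q'
          (pvFromB r1 ((r1.res.length : Int) - 1) dep) (by omega) rfl rfl hrun1
      refine ⟨fB', rB, by omega, ?_, hrun'⟩
      rw [List.foldlM_cons, pvVisitB_mono edges fB f hfB a (dep + 1) (pvToB sB) r1 hv1]
      simpa [pvToB_fromB] using hfold'
  -- unfold one step of A
  simp only [pvLoopA, if_pos hi] at hrun
  rw [pvPush_eq] at hrun
  set r' := pvSetB s.reached i true with hr'
  set cs := ((pvGetE edges i).reverse.filter (fun a => !pvNget r' a)) with hcs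
  have hd_pos : ∀ a ∈ cs.reverse, a ∈ S := by
    intro a ha
    rw [List.mem_reverse] at ha
    have := (List.mem_filter.1 (hcs ▸ ha)).1
    exact (hS i hiS).2 a (List.mem_reverse.1 this)
  obtain ⟨fB', rB, hle, hfoldEq, hrun2⟩ :=
    hfold cs.reverse hd_pos f ((-i - 1) :: q)
      { reached := r', res := s.res ++ [i],
        left := pvSetO s.left i (s.index + 1), right := pvSetO s.right i (s.index + 1),
        depth := pvSetO s.depth i (s.dep + 1), childs := pvAppC s.childs i cs,
        index := s.index + 1, dep := s.dep + 1 }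
      (le_refl f) (by simp; omega) (by simp; omega) hrun
  have hidx1 : s.index + 1 = (s.res.length : Int) := by omega
  have hdep1 : s.dep + 1 = dep := by omega
  rw [hidx1, hdep1] at hfoldEq
  simp only [pvToB] at hfoldEq
  have hBrun : pvVisitB edges (f + 1) i dep (pvToB s) = some (pvClose i rB) := by
    rw [pvVisitB_succ]
    simp only [pvToB]
    rw [← hr', ← hcs, hfoldEq]
  -- A pops the marker ~i
  match fB', hle, hrun2 with
  | 0, hle, hrun2 => simp [pvLoopA] at hrun2
  | fb + 1, hle, hrun2 =>
  have hni : ¬ (0 ≤ -i - 1) := by omega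
  simp only [pvLoopA, if_neg hni, pvFromB] at hrun2
  rw [show -(-i - 1) - 1 = i from by ring] at hrun2
  by_cases hc : PySem.List.pyGet? rB.res (-1) = some i
  · rw [if_pos hc] at hrun2
    refine ⟨fb, pvClose i rB, by omega, hBrun, ?_⟩
    have hcl : pvClose i rB = rB := by rw [pvClose, if_pos hc]
    rw [hcl]
    rw [show (rB.res.length : Int) - 1 + 1 - 1 = (rB.res.length : Int) - 1 from by ring] at hrun2
    simp only [pvFromB]
    exact hrun2
  · rw [if_neg hc] at hrun2
    refine ⟨fb, pvClose i rB, by omega, hBrun, ?_⟩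
    have hcl : pvClose i rB
        = { rB with res := rB.res ++ [i], right := pvSetO rB.right i (rB.res.length : Int) } := by
      rw [pvClose, if_neg hc]
    rw [hcl]
    simp only [pvFromB]
    rw [show (((rB.res ++ [i]).length : Int) - 1) = (rB.res.length : Int) from by simp]
    rw [show (rB.res.length : Int) - 1 + 1 = (rB.res.length : Int) from by ring] at hrun2
    exact hrun2


-- ---- potential, invariants, and sufficiency of the fuel for A inside Pre_ ----
def pvE (edges : List (List Int)) : Nat := (edges.map List.length).sum
def pvCntF (r : List Bool) : Nat := r.count false
def pvPhi (edges : List (List Int)) (q : List Int) (r : List Bool) : Nat :=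
  q.length + 2 * pvCntF r * (pvE edges + 1)
def pvQok (S : List Int) (q : List Int) : Prop :=
  ∀ e ∈ q, (0 ≤ e ∧ e ∈ S) ∨ (e < 0 ∧ -e - 1 ∈ S)
-- the stack-discipline invariant: a queue entry that is already reached can only have
-- neighbours that are reached or scheduled ABOVE it (so on pop they are all reached)
def pvINV (edges : List (List Int)) (q : List Int) (r : List Bool) : Prop :=
  ∀ u e v, q = u ++ e :: v → 0 ≤ e → pvNget r e = true →
    ∀ a ∈ pvGetE edges e, pvNget r a = true ∨ a ∈ u

theorem pvNget_setB (r : List Bool) (x e : Int) (v : Bool) :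
    pvNget (pvSetB r x v) e
      = if x.toNat = e.toNat ∧ x.toNat < r.length then v else pvNget r e := by
  unfold pvNget pvSetB List.getD
  rcases Nat.lt_or_ge x.toNat r.length with h | h
  · rw [List.getElem?_set]
    by_cases hx : x.toNat = e.toNat
    · have h' : e.toNat < r.length := hx ▸ h
      simp [hx, h']
    · simp [hx]
  · rw [List.set_eq_of_length_le h]
    have : ¬ (x.toNat = e.toNat ∧ x.toNat < r.length) := by omega
    simp [this]

theorem pvNget_set_true_mono {r : List Bool} {x e : Int} (h : pvNget r e = true) :
    pvNget (pvSetB r x true) e = true := by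
  rw [pvNget_setB]; split <;> simp [h]

theorem pvNget_set_self {r : List Bool} {e : Int} (h : e.toNat < r.length) :
    pvNget (pvSetB r e true) e = true := by
  rw [pvNget_setB]; simp [h]

theorem pvCntF_set_true (r : List Bool) (k : Nat) (hk : k < r.length)
    (hf : r.getD k false = false) : (r.set k true).count false + 1 = r.count false := by
  induction r generalizing k with
  | nil => simp at hk
  | cons b r ihr =>
    cases k with
    | zero =>
      rw [List.getD_cons_zero] at hf
      subst hf
      rw [List.set_cons_zero, List.count_cons, List.count_cons]
      simp
    | succ k =>
      simp only [List.length_cons, Nat.add_lt_add_iff_right] at hk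
      rw [List.getD_cons_succ] at hf
      rw [List.set_cons_succ, List.count_cons, List.count_cons]
      have := ihr k hk hf
      omega

theorem pvCntF_set_true_same (r : List Bool) (k : Nat)
    (ht : r.getD k false = true) : (r.set k true).count false = r.count false := by
  induction r generalizing k with
  | nil => simp
  | cons b r ihr =>
    cases k with
    | zero =>
      rw [List.getD_cons_zero] at ht
      subst ht
      rw [List.set_cons_zero]
    | succ k =>
      rw [List.getD_cons_succ] at ht
      rw [List.set_cons_succ, List.count_cons, List.count_cons, ihr k ht]

theorem pvGetE_len_le (edges : List (List Int)) (e : Int) :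
    (pvGetE edges e).length ≤ pvE edges := by
  unfold pvGetE
  cases hg : PySem.List.pyGet? edges e with
  | none => simp
  | some l0 =>
    have hm : l0 ∈ edges := PySem.List.mem_of_pyGet?_eq_some (xs := edges) hg
    have : l0.length ∈ edges.map List.length := List.mem_map_of_mem hm
    simpa [pvE] using List.single_le_sum (fun x _ => Nat.zero_le x) _ this

theorem pvSC_row {edges : List (List Int)} {n : Nat} {S : List Int}
    (h : pvSC edges n S) {e : Int} (he : e ∈ S) :
    ∀ a ∈ pvGetE edges e, 0 ≤ a ∧ a < (n : Int) ∧ a ∈ S := by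
  intro a ha
  have haS : a ∈ S := (h e he).2 a ha
  exact ⟨(h a haS).1.1, (h a haS).1.2, haS⟩

theorem pvINV_marker {edges : List (List Int)} {e : Int} {rest : List Int} {r : List Bool}
    (hRT : ∀ x, 0 ≤ x → pvNget r x = true → ∀ a ∈ pvGetE edges x, 0 ≤ a) (he : e < 0)
    (hinv : pvINV edges (e :: rest) r) : pvINV edges rest r := by
  intro u e' v hsplit he' hr' a ha
  have := hinv (e :: u) e' v (by rw [hsplit]; rfl) he' hr' a ha
  rcases this with h | h
  · exact Or.inl h
  · rcases List.mem_cons.1 h with rfl | h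
    · exact absurd (hRT e' he' hr' a ha) (by omega)
    · exact Or.inr h

theorem pvINV_open {edges : List (List Int)}
    {e : Int} {rest : List Int} {r : List Bool}
    (hrow : ∀ a ∈ pvGetE edges e, 0 ≤ a) (he : 0 ≤ e) (hlt : e.toNat < r.length)
    (hinv : pvINV edges (e :: rest) r) :
    pvINV edges
      (pvPairs ((pvGetE edges e).reverse.filter (fun a => !pvNget (pvSetB r e true) a)).reverse
        ++ rest) (pvSetB r e true) := by
  set r' := pvSetB r e true with hr'
  set cs := (pvGetE edges e).reverse.filter (fun a => !pvNget r' a) with hcs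
  intro u e' v hsplit he' hre' a ha
  have hmemP : ∀ x ∈ pvPairs cs.reverse, ∃ b ∈ cs, x = b ∨ x = -b - 1 := by
    intro x hx
    obtain ⟨b, hb, hxb⟩ := pvMem_pairs.1 hx
    exact ⟨b, List.mem_reverse.1 hb, hxb⟩
  have hcase : ∀ w : List Int, u = pvPairs cs.reverse ++ w → rest = w ++ e' :: v →
      pvNget r' a = true ∨ a ∈ u := by
    intro w hu hrest
    by_cases htn : e.toNat = e'.toNat ∧ e.toNat < r.length
    · have he'e : e' = e := by omega
      subst he'e
      by_cases hna : pvNget r' a = true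
      · exact Or.inl hna
      · refine Or.inr ?_
        have hacs : a ∈ cs := by
          rw [hcs]
          refine List.mem_filter.2 ⟨List.mem_reverse.2 ha, by simp [hna]⟩
        rw [hu]
        exact List.mem_append_left _ (pvMem_pairs.2 ⟨a, List.mem_reverse.2 hacs, Or.inl rfl⟩)
    · have hre : pvNget r e' = true := by
        rw [hr', pvNget_setB, if_neg htn] at hre'
        exact hre'
      have hold := hinv (e :: w) e' v (by rw [hrest]; rfl) he' hre a ha
      rcases hold with h | h
      · exact Or.inl (pvNget_set_true_mono h)
      · rcases List.mem_cons.1 h with rfl | h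
        · exact Or.inl (pvNget_set_self hlt)
        · exact Or.inr (by rw [hu]; exact List.mem_append_right _ h)
  rcases List.append_eq_append_iff.1 hsplit with ⟨w, hu, hrest⟩ | ⟨c', hP, hv⟩
  · exact hcase w hu hrest
  · match c', hP, hv with
    | [], hP, hv =>
      refine hcase [] ?_ ?_
      · rw [List.append_nil]
        simpa using hP.symm
      · rw [List.nil_append]
        simpa using hv.symm
    | x :: c'', hP, hv =>
      have hx : x ∈ pvPairs cs.reverse := by rw [hP]; simp
      obtain ⟨b, hb, hxb⟩ := hmemP x hx
      have hbF : pvNget r' b = false := by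
        have := (List.mem_filter.1 (hcs ▸ hb)).2
        simpa using this
      have hbpos : 0 ≤ b := by
        have := List.mem_reverse.1 (List.mem_filter.1 (hcs ▸ hb)).1
        exact hrow b this
      have he'x : e' = x := by
        have h2 := hv
        rw [List.cons_append] at h2
        exact (List.cons_eq_cons.1 h2).1
      rcases hxb with rfl | rfl
      · rw [he'x] at hre'
        rw [hre'] at hbF
        exact absurd hbF (by simp)
      · omega

theorem pvComp (edges : List (List Int)) (n : Nat) (S : List Int) (hS : pvSC edges n S) :
    ∀ m : Nat, ∀ (q : List Int) (s : PvStA), s.reached.length = n →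
      pvQok S q → (∀ x, 0 ≤ x → pvNget s.reached x = true → x ∈ S) →
      pvINV edges q s.reached →
      pvPhi edges q s.reached ≤ m → ∃ t, pvLoopA edges (m + 1) q s = some t := by
  intro m
  induction m with
  | zero =>
    intro q s hlen hvq hrt hinv hphi
    have hq : q.length = 0 := by unfold pvPhi at hphi; omega
    match q, hq with
    | [], _ => exact ⟨s, by simp [pvLoopA]⟩
  | succ m ihm =>
    intro q s hlen hvq hrt hinv hphi
    match q with
    | [] => exact ⟨s, by simp [pvLoopA]⟩
    | e :: rest =>
      have hRTrow : ∀ x, 0 ≤ x → pvNget s.reached x = true → ∀ a ∈ pvGetE edges x, 0 ≤ a := by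
        intro x hx0 hxr a ha
        exact (pvSC_row hS (hrt x hx0 hxr) a ha).1
      by_cases he : 0 ≤ e
      · -- node pop
        have heS : e ∈ S := by
          rcases hvq e (by simp) with h | h
          · exact h.2
          · omega
        have hen : e < (n : Int) := (hS e heS).1.2
        have hlt : e.toNat < s.reached.length := by rw [hlen]; omega
        set r' := pvSetB s.reached e true with hr'
        set cs := (pvGetE edges e).reverse.filter (fun a => !pvNget r' a) with hcs
        have hcsub : ∀ a ∈ cs, 0 ≤ a ∧ a < (n : Int) ∧ a ∈ S := by
          intro a ha
          have := List.mem_reverse.1 (List.mem_filter.1 (hcs ▸ ha)).1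
          exact pvSC_row hS heS a this
        have hlen' : r'.length = n := by rw [hr', pvSetB, List.length_set, hlen]
        have hvq' : pvQok S (pvPairs cs.reverse ++ rest) := by
          intro x hx
          rcases List.mem_append.1 hx with hx | hx
          · obtain ⟨b, hb, hxb⟩ := pvMem_pairs.1 hx
            have hbb := hcsub b (List.mem_reverse.1 hb)
            rcases hxb with rfl | rfl
            · exact Or.inl ⟨hbb.1, hbb.2.2⟩
            · refine Or.inr ⟨by omega, ?_⟩
              rw [show -(-b - 1) - 1 = b from by ring]
              exact hbb.2.2
          · exact hvq x (by simp [hx])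
        have hrt' : ∀ x, 0 ≤ x → pvNget r' x = true → x ∈ S := by
          intro x hx0 hxr
          rw [hr', pvNget_setB] at hxr
          by_cases hc : e.toNat = x.toNat ∧ e.toNat < s.reached.length
          · have : x = e := by omega
            exact this ▸ heS
          · rw [if_neg hc] at hxr
            exact hrt x hx0 hxr
        have hrow : ∀ a ∈ pvGetE edges e, 0 ≤ a := fun a ha => (pvSC_row hS heS a ha).1
        have hinv' : pvINV edges (pvPairs cs.reverse ++ rest) r' :=
          pvINV_open hrow he hlt hinv
        have hklE : cs.length ≤ pvE edges := by
          calc cs.length ≤ (pvGetE edges e).reverse.length := by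
                rw [hcs]; exact List.length_filter_le _ _
            _ = (pvGetE edges e).length := by simp
            _ ≤ pvE edges := pvGetE_len_le edges e
        have hphi' : pvPhi edges (pvPairs cs.reverse ++ rest) r' ≤ m := by
          by_cases hre : pvNget s.reached e = true
          · -- revisit: all neighbours reached, cs = []
            have hcs0 : cs = [] := by
              rw [hcs]
              apply List.filter_eq_nil_iff.2
              intro a ha
              have haE := List.mem_reverse.1 ha
              have := hinv [] e rest rfl he hre a haE
              rcases this with h | h
              · have hm : pvNget r' a = true := by rw [hr']; exact pvNget_set_true_mono h
                simp [hm]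
              · simp at h
            have hcnt : pvCntF r' = pvCntF s.reached := by
              unfold pvCntF
              rw [hr', pvSetB]
              exact pvCntF_set_true_same _ _ hre
            rw [hcs0]
            unfold pvPhi at hphi ⊢
            simp only [pvPairs, List.reverse_nil, List.flatMap_nil, List.nil_append]
            rw [hcnt]
            simp only [List.length_cons] at hphi
            omega
          · -- fresh visit: one more node reached
            have hre' : s.reached.getD e.toNat false = false := by
              unfold pvNget at hre
              simpa using hre
            have hcnt : pvCntF r' + 1 = pvCntF s.reached := by
              unfold pvCntF
              rw [hr', pvSetB]
              exact pvCntF_set_true _ _ hlt hre'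
            unfold pvPhi at hphi ⊢
            rw [List.length_append, pvLength_pairs, List.length_reverse]
            simp only [List.length_cons] at hphi
            have hE1 : 2 * pvCntF s.reached * (pvE edges + 1)
                = 2 * pvCntF r' * (pvE edges + 1) + 2 * (pvE edges + 1) := by
              rw [← hcnt]; ring
            omega
        obtain ⟨t, ht⟩ := ihm (pvPairs cs.reverse ++ rest)
          { reached := r', res := s.res ++ [e],
            left := pvSetO s.left e (s.index + 1), right := pvSetO s.right e (s.index + 1),
            depth := pvSetO s.depth e (s.dep + 1), childs := pvAppC s.childs e cs,
            index := s.index + 1, dep := s.dep + 1 }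
          hlen' hvq' hrt' hinv' hphi'
        refine ⟨t, ?_⟩
        simp only [pvLoopA, if_pos he]
        rw [pvPush_eq]
        exact ht
      · -- marker pop
        have hvq' : pvQok S rest := fun x hx => hvq x (by simp [hx])
        have hinv' : pvINV edges rest s.reached := pvINV_marker hRTrow (by omega) hinv
        have hphi' : pvPhi edges rest s.reached ≤ m := by
          unfold pvPhi at hphi ⊢
          simp only [List.length_cons] at hphi
          omega
        by_cases hc : PySem.List.pyGet? s.res (-1) = some (-e - 1)
        · obtain ⟨t, ht⟩ := ihm rest { s with index := s.index + 1 - 1, dep := s.dep - 1 }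
            hlen hvq' hrt hinv' hphi'
          refine ⟨t, ?_⟩
          simp only [pvLoopA, if_neg he]
          rw [if_pos hc]
          exact ht
        · obtain ⟨t, ht⟩ := ihm rest
            { s with res := s.res ++ [-e - 1], right := pvSetO s.right (-e - 1) (s.index + 1),
                     index := s.index + 1, dep := s.dep - 1 }
            hlen hvq' hrt hinv' hphi'
          refine ⟨t, ?_⟩
          simp only [pvLoopA, if_neg he]
          rw [if_neg hc]
          exact ht

theorem pvNget_replicate (k : Nat) (e : Int) : pvNget (List.replicate k false) e = false := by
  unfold pvNget List.getD
  rcases Nat.lt_or_ge e.toNat k with h | h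
  · simp [h]
  · rw [List.getElem?_eq_none (by simpa using h)]
    rfl

theorem pvCntF_replicate (k : Nat) : pvCntF (List.replicate k false) = k := by
  unfold pvCntF
  simp

theorem EulerTour2_spec : Claim_equal_EulerTour2 := by
  unfold Claim_equal_EulerTour2
  intro n edges start hdom hpre
  obtain ⟨hs0, hsn, hstS, hcl⟩ := hpre
  unfold Spec_EulerTour2
  have hNn : (n.toNat : Int) = n := Int.toNat_of_nonneg (by omega)
  have hSC : pvSC edges n.toNat (pvReach edges start) := by
    intro i hi
    refine ⟨⟨(hcl i hi).1.1, by rw [hNn]; exact (hcl i hi).1.2.1⟩, (hcl i hi).2⟩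
  have hSCw : pvSCw edges (pvReach edges start) := by
    intro i hi
    exact ⟨(hSC i hi).1.1, (hSC i hi).2⟩
  have hlen : (pvInitA n).reached.length = n.toNat := by simp [pvInitA]
  have hvq : pvQok (pvReach edges start) [start, -start - 1] := by
    intro x hx
    rcases List.mem_cons.1 hx with rfl | hx
    · exact Or.inl ⟨hs0, hstS⟩
    · rcases List.mem_cons.1 hx with rfl | hx
      · refine Or.inr ⟨by omega, ?_⟩
        rw [show -(-start - 1) - 1 = start from by ring]
        exact hstS
      · simp at hx
  have hrt0 : ∀ x, 0 ≤ x → pvNget (pvInitA n).reached x = true → x ∈ pvReach edges start := by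
    intro x _ hx
    rw [show (pvInitA n).reached = List.replicate n.toNat false from rfl,
      pvNget_replicate] at hx
    simp at hx
  have hinv0 : pvINV edges [start, -start - 1] (pvInitA n).reached := by
    intro u e v hsp he hr
    rw [show (pvInitA n).reached = List.replicate n.toNat false from rfl,
      pvNget_replicate] at hr
    simp at hr
  have hphi0 : pvPhi edges [start, -start - 1] (pvInitA n).reached
      ≤ 2 * n.toNat * (pvE edges + 1) + 2 := by
    unfold pvPhi
    rw [show (pvInitA n).reached = List.replicate n.toNat false from rfl, pvCntF_replicate]
    simp only [List.length_cons, List.length_nil]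
    omega
  obtain ⟨t, hrunA⟩ := pvComp edges n.toNat (pvReach edges start) hSC
    (2 * n.toNat * (pvE edges + 1) + 2)
    [start, -start - 1] (pvInitA n) hlen hvq hrt0 hinv0 hphi0
  have hfuel : pvFuelA n edges = 2 * n.toNat * (pvE edges + 1) + 2 + 1 := by
    unfold pvFuelA pvE
    omega
  rw [← hfuel] at hrunA
  obtain ⟨fA', r, hlt, hBrun, hrest⟩ :=
    pvSim edges (pvReach edges start) hSCw (pvFuelA n edges) start 0 [] (pvInitA n) t hstS
      (by simp [pvInitA]) (by simp [pvInitA]) hrunA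
  have ht : t = pvFromB r ((r.res.length : Int) - 1) (0 - 1) := by
    match fA', hrest with
    | 0, hrest => simp [pvLoopA] at hrest
    | fb + 1, hrest =>
      simp only [pvLoopA] at hrest
      exact (Option.some.inj hrest).symm
  have hB0 : pvToB (pvInitA n) = pvInitB n := rfl
  rw [hB0] at hBrun
  show EulerTour2 n edges start = EulerTour2_alt n edges start
  unfold EulerTour2 EulerTour2_alt
  rw [hrunA, hBrun, ht]
  rfl
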